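-- pv_equiv track=rewrite | github.com/Sujay-197/kreativegenesis-code-wave | main.py | _build_asset_context
-- ===== SOURCE A (Python) =====
-- def _build_asset_context(assets: dict[str, str]) -> str:
--     """Format loaded template files into a prompt-friendly block.
--     Prioritizes key structural files (index, login, tables, CSS, JS) and
--     keeps total size under a budget to avoid exceeding LLM context."""
--     if not assets:
--         return ""
--
--     # Priority order — most important files first
--     PRIORITY = [
--         "index.html", "login.html", "register.html", "tables.html",
--         "charts.html", "cards.html", "blank.html", "404.html",
--         "css/sb-admin-2.css", "js/sb-admin-2.js",
--         "js/demo/chart-area-demo.js", "js/demo/chart-bar-demo.js",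
--         "js/demo/chart-pie-demo.js", "js/demo/datatables-demo.js",
--     ]
--
--     ordered_keys = []
--     for p in PRIORITY:
--         if p in assets:
--             ordered_keys.append(p)
--     # Add remaining files not already included
--     for k in sorted(assets.keys()):
--         if k not in ordered_keys:
--             ordered_keys.append(k)
--
--     parts = []
--     total_chars = 0
--     MAX_TOTAL = 48000  # ~12k tokens budget for template context
--
--     for path in ordered_keys:
--         content = assets[path]
--         # Truncate individual large files
--         if len(content) > 8000:
--             content = content[:8000] + "\n... (truncated)"
--         if total_chars + len(content) > MAX_TOTAL:
--             parts.append(f"── {path} ── (skipped, context budget reached)")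
--             continue
--         parts.append(f"── {path} ──\n{content}")
--         total_chars += len(content)
--
--     return "\n\n".join(parts)
-- ===== SOURCE B (Python) =====
-- def _build_asset_context(assets: dict[str, str]) -> str:
--     """Same output as A: one keyed sort replaces A's priority loop plus
--     the quadratic 'not in ordered_keys' dedup scan."""
--     PRIORITY = [
--         "index.html", "login.html", "register.html", "tables.html",
--         "charts.html", "cards.html", "blank.html", "404.html",
--         "css/sb-admin-2.css", "js/sb-admin-2.js",
--         "js/demo/chart-area-demo.js", "js/demo/chart-bar-demo.js",
--         "js/demo/chart-pie-demo.js", "js/demo/datatables-demo.js",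
--     ]
--     rank = {p: i for i, p in enumerate(PRIORITY)}
--
--     parts = []
--     budget = 48000  # ~12k tokens budget for template context
--     for path in sorted(assets, key=lambda k: (rank.get(k, len(PRIORITY)), k)):
--         content = assets[path]
--         if len(content) > 8000:
--             content = content[:8000] + "\n... (truncated)"
--         if len(content) > budget:
--             parts.append(f"── {path} ── (skipped, context budget reached)")
--         else:
--             parts.append(f"── {path} ──\n{content}")
--             budget -= len(content)
--     return "\n\n".join(parts)
-- ===== Notes on version B (the rewrite author's own statement) =====
-- stated objective: faster
-- what changed: A's priority loop plus a second loop with a quadratic 'k not in ordered_keys' list scan is replaced by one keyed sort over a precomputed rank table (priority index, then name), and the budget loop tracks the remaining budget instead of a running total.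
import Mathlib
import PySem

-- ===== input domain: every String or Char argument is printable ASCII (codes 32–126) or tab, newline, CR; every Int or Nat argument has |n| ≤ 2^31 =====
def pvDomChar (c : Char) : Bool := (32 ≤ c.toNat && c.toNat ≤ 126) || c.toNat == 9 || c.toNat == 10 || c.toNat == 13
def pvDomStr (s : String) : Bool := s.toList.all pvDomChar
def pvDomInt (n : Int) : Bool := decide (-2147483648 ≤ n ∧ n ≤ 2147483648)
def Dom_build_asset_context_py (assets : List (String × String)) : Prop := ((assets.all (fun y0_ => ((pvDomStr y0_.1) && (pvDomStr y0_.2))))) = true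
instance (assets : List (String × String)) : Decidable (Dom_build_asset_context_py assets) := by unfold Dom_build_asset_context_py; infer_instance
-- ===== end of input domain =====

-- B replaces A's priority loop followed by a quadratic 'not in ordered_keys' list scan
-- with a single keyed sort over a rank table; the budget loop keeps a remaining budget.

-- shared constant: the PRIORITY list (same literal in both Pythons)
def pvPriority : List String :=
  ["index.html", "login.html", "register.html", "tables.html",
   "charts.html", "cards.html", "blank.html", "404.html",
   "css/sb-admin-2.css", "js/sb-admin-2.js",
   "js/demo/chart-area-demo.js", "js/demo/chart-bar-demo.js",
   "js/demo/chart-pie-demo.js", "js/demo/datatables-demo.js"]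

-- shared per-file lookup + truncation (these lines are identical in both Pythons;
-- path is always a dict key, so assets[path] cannot raise and getD's default is unreachable)
def pvContent (d : PySem.Dict String String) (path : String) : String :=
  let content := d.getD path ""
  if PySem.Str.len content > 8000 then
    PySem.Str.slice content none (some 8000) ++ "\n... (truncated)" else content

-- ===== PORT A =====
-- body of A's budget loop: tracks the running total of chars
def pvStepA (d : PySem.Dict String String) (st : List String × Int) (path : String) :
    List String × Int :=
  let content := pvContent d path
  if st.2 + PySem.Str.len content > 48000 then
    (st.1 ++ ["── " ++ path ++ " ── (skipped, context budget reached)"], st.2)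
  else
    (st.1 ++ ["── " ++ path ++ " ──\n" ++ content], st.2 + PySem.Str.len content)

def build_asset_context_py (assets : List (String × String)) : String :=
  if assets.isEmpty then "" else
  let d := PySem.Dict.ofList assets
  let ordered1 := pvPriority.foldl (fun acc p => if d.contains p then acc ++ [p] else acc) []
  let ordered := (PySem.List.sorted (PySem.Dict.keys d) (fun k => k)).foldl
      (fun acc k => if k ∈ acc then acc else acc ++ [k]) ordered1
  let st := ordered.foldl (pvStepA d) ([], 0)
  PySem.Str.join "\n\n" st.1

-- ===== PORT B =====
-- rank = {p: i for i, p in enumerate(PRIORITY)}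
def pvRank : PySem.Dict String Int :=
  (PySem.List.enumerate pvPriority).foldl (fun r p => r.insert p.2 p.1) PySem.Dict.empty

-- the sort key: lambda k: (rank.get(k, len(PRIORITY)), k)  (Python tuple order = lex order)
def pvKey (k : String) : Lex (Int × String) :=
  toLex (PySem.Dict.getD pvRank k (pvPriority.length : Int), k)

-- body of B's budget loop (keeps the REMAINING budget instead of the running total)
def pvStepB (d : PySem.Dict String String) (st : List String × Int) (path : String) :
    List String × Int :=
  let content := pvContent d path
  if PySem.Str.len content > st.2 then
    (st.1 ++ ["── " ++ path ++ " ── (skipped, context budget reached)"], st.2)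
  else
    (st.1 ++ ["── " ++ path ++ " ──\n" ++ content], st.2 - PySem.Str.len content)

def build_asset_context_py_alt (assets : List (String × String)) : String :=
  let d := PySem.Dict.ofList assets
  let st := (PySem.List.sorted (PySem.Dict.keys d) pvKey).foldl (pvStepB d) ([], 48000)
  PySem.Str.join "\n\n" st.1

-- ===== PRECONDITION & SPEC =====
def Spec_build_asset_context_py (assets : List (String × String)) (out : String) : Prop := out = build_asset_context_py_alt assets
instance (assets : List (String × String)) (out : String) : Decidable (Spec_build_asset_context_py assets out) := by unfold Spec_build_asset_context_py; infer_instance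

-- ===== CLAIM (what is proved, stated in full; the proofs are below) =====
def Claim_equal_build_asset_context_py : Prop := ∀ (assets : List (String × String)), Dom_build_asset_context_py assets → Spec_build_asset_context_py assets (build_asset_context_py assets)

-- ===== LEMMAS AND PROOFS =====

lemma pvPriority_nodup : pvPriority.Nodup := by decide

lemma pvRank_keys : pvRank.keys = pvPriority := by decide

lemma pvRank_pairwise :
    pvPriority.Pairwise (fun a b =>
      PySem.Dict.getD pvRank a (pvPriority.length : Int) <
      PySem.Dict.getD pvRank b (pvPriority.length : Int)) := by decide

lemma pvRank_lt_of_mem (p : String) (hp : p ∈ pvPriority) :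
    PySem.Dict.getD pvRank p (pvPriority.length : Int) < (pvPriority.length : Int) := by
  fin_cases hp <;> decide

lemma pvRank_of_not_mem (k : String) (hk : k ∉ pvPriority) :
    PySem.Dict.getD pvRank k (pvPriority.length : Int) = (pvPriority.length : Int) := by
  apply PySem.Dict.getD_of_not_contains
  rw [PySem.Dict.contains_eq_decide_mem_keys, pvRank_keys]
  simpa using hk

-- A's 'if k not in ordered_keys: ordered_keys.append(k)' loop over a duplicate-free list
lemma pvDedupFold (L : List String) (init : List String) (h : L.Nodup) :
    L.foldl (fun acc k => if k ∈ acc then acc else acc ++ [k]) init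
      = init ++ L.filter (fun k => decide (k ∉ init)) := by
  induction L generalizing init with
  | nil => simp
  | cons x t ih =>
    rcases List.nodup_cons.mp h with ⟨hx, ht⟩
    by_cases hxi : x ∈ init
    · simp [List.foldl_cons, hxi, ih _ ht]
    · have hfilter : t.filter (fun k => decide (k ∉ init ++ [x]))
          = t.filter (fun k => decide (k ∉ init)) := by
        apply List.filter_congr
        intro a ha
        have : a ≠ x := fun hax => hx (hax ▸ ha)
        simp [List.mem_append, this]
      simp only [List.foldl_cons, if_neg hxi, ih _ ht, hfilter]
      simp [hxi, List.append_assoc]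

-- B's single keyed sort produces exactly A's ordered_keys
lemma pvOrder (d : PySem.Dict String String) (hnd : d.keys.Nodup) :
    PySem.List.sorted d.keys pvKey
      = pvPriority.filter d.contains
        ++ (PySem.List.sorted d.keys (fun k => k)).filter
             (fun k => decide (k ∉ pvPriority.filter d.contains)) := by
  set Pp := pvPriority.filter d.contains with hPp
  set K := PySem.List.sorted d.keys (fun k : String => k) with hK
  have hKperm : K.Perm d.keys := PySem.List.sorted_perm _ _ _
  have hKnd : K.Nodup := (hKperm.nodup_iff).mpr hnd
  have hPpnd : Pp.Nodup := pvPriority_nodup.filter _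
  have hPpsubK : ∀ x ∈ Pp, x ∈ K := by
    intro x hx
    rcases List.mem_filter.mp hx with ⟨hxp, hxc⟩
    have : x ∈ d.keys := (PySem.Dict.contains_iff_mem_keys _ _).mp hxc
    exact (PySem.List.mem_sorted _ _ _ _).mpr this
  -- membership in the rest means: a key of d that is NOT a priority file
  have hrest : ∀ b ∈ K.filter (fun k => decide (k ∉ Pp)), b ∈ K ∧ b ∉ pvPriority := by
    intro b hb
    rcases List.mem_filter.mp hb with ⟨hbK, hbn⟩
    have hbnp : b ∉ Pp := by simpa using hbn
    refine ⟨hbK, fun hbp => hbnp ?_⟩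
    have : d.contains b = true := (PySem.Dict.contains_iff_mem_keys _ _).mpr
      ((PySem.List.mem_sorted _ _ _ _).mp hbK)
    exact List.mem_filter.mpr ⟨hbp, this⟩
  apply PySem.List.sorted_eq_of_perm_of_pairwise_lt
  · -- permutation
    have h1 : (K.filter (fun k => decide (k ∈ Pp))
        ++ K.filter (fun k => !decide (k ∈ Pp))).Perm K := List.filter_append_perm _ _
    have h2 : (K.filter (fun k => decide (k ∈ Pp))).Perm Pp := by
      rw [List.perm_ext_iff_of_nodup (hKnd.filter _) hPpnd]
      intro a
      constructor
      · intro ha; exact of_decide_eq_true (List.mem_filter.mp ha).2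
      · intro ha; exact List.mem_filter.mpr ⟨hPpsubK a ha, decide_eq_true ha⟩
    have h3 : (K.filter (fun k => !decide (k ∈ Pp)))
        = K.filter (fun k => decide (k ∉ Pp)) := by
      apply List.filter_congr; intro a _; simp
    have h1' : (K.filter (fun k => decide (k ∈ Pp))
        ++ K.filter (fun k => decide (k ∉ Pp))).Perm K := by rw [h3] at h1; exact h1
    exact ((h2.symm.append_right _).trans h1').trans hKperm
  · -- strictly increasing under pvKey
    rw [List.pairwise_append]
    refine ⟨?_, ?_, ?_⟩
    · -- within the priority prefix: ranks strictly increase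
      have := (pvRank_pairwise).sublist (List.filter_sublist (p := d.contains) (l := pvPriority))
      refine this.imp ?_
      intro a b hab
      exact Prod.Lex.toLex_lt_toLex.mpr (Or.inl hab)
    · -- within the alphabetical rest: ranks are all len(PRIORITY), names strictly increase
      have hle : K.Pairwise (fun a b : String => a ≤ b) := by
        simpa using PySem.List.sorted_pairwise (xs := d.keys) (key := fun k : String => k)
      have hne : K.Pairwise (fun a b : String => a ≠ b) := hKnd
      have hcomb : (K.filter (fun k => decide (k ∉ Pp))).Pairwise
          (fun a b : String => a ≤ b ∧ a ≠ b) :=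
        ((hle.and hne).sublist List.filter_sublist)
      refine hcomb.imp_of_mem ?_
      intro a b ha hb ⟨hab, hne'⟩
      have hra := pvRank_of_not_mem a (hrest a ha).2
      have hrb := pvRank_of_not_mem b (hrest b hb).2
      exact Prod.Lex.toLex_lt_toLex.mpr (Or.inr ⟨hra.trans hrb.symm, lt_of_le_of_ne hab hne'⟩)
    · -- across: priority rank < len(PRIORITY) = rank of the rest
      intro a ha b hb
      have hap : a ∈ pvPriority := (List.mem_filter.mp ha).1
      have hra := pvRank_lt_of_mem a hap
      have hrb := pvRank_of_not_mem b (hrest b hb).2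
      exact Prod.Lex.toLex_lt_toLex.mpr (Or.inl (by rw [hrb]; exact hra))

-- running total ≤ budget: A tracks the total, B the remaining budget; same parts
lemma pvStepA_apply (d : PySem.Dict String String) (parts : List String) (t : Int)
    (x : String) :
    pvStepA d (parts, t) x =
      if t + PySem.Str.len (pvContent d x) > 48000 then
        (parts ++ ["── " ++ x ++ " ── (skipped, context budget reached)"], t)
      else (parts ++ ["── " ++ x ++ " ──\n" ++ pvContent d x],
            t + PySem.Str.len (pvContent d x)) := rfl

lemma pvStepB_apply (d : PySem.Dict String String) (parts : List String) (b : Int)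
    (x : String) :
    pvStepB d (parts, b) x =
      if PySem.Str.len (pvContent d x) > b then
        (parts ++ ["── " ++ x ++ " ── (skipped, context budget reached)"], b)
      else (parts ++ ["── " ++ x ++ " ──\n" ++ pvContent d x],
            b - PySem.Str.len (pvContent d x)) := rfl

lemma pvBudget (d : PySem.Dict String String) (L : List String) :
    ∀ (parts : List String) (t : Int),
      (L.foldl (pvStepA d) (parts, t)).1 = (L.foldl (pvStepB d) (parts, 48000 - t)).1 := by
  induction L with
  | nil => intro parts t; rfl
  | cons x xs ih =>
    intro parts t
    rw [List.foldl_cons, List.foldl_cons, pvStepA_apply, pvStepB_apply]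
    by_cases h : t + PySem.Str.len (pvContent d x) > 48000
    · rw [if_pos h, if_pos (by omega)]
      exact ih _ t
    · rw [if_neg h, if_neg (by omega)]
      have h48 : (48000 : Int) - t - PySem.Str.len (pvContent d x)
          = 48000 - (t + PySem.Str.len (pvContent d x)) := by ring
      rw [h48]
      exact ih _ _

-- ===== VERDICT (by name: the statement is the Claim_ definition above) =====
theorem build_asset_context_py_spec : Claim_equal_build_asset_context_py := by
  intro assets _
  unfold Spec_build_asset_context_py
  cases assets with
  | nil => decide
  | cons a as =>
    unfold build_asset_context_py build_asset_context_py_alt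
    simp only [List.isEmpty_cons, if_neg (by decide : ¬ (false = true))]
    set d := PySem.Dict.ofList (a :: as) with hd
    have hnd : d.keys.Nodup := PySem.Dict.nodup_keys_ofList _
    have hord : (PySem.List.sorted (PySem.Dict.keys d) (fun k => k)).foldl
        (fun acc k => if k ∈ acc then acc else acc ++ [k])
        (pvPriority.foldl (fun acc p => if d.contains p then acc ++ [p] else acc) [])
        = PySem.List.sorted d.keys pvKey := by
      rw [PySem.List.foldl_append_if_eq_filter d.contains pvPriority []]
      rw [pvDedupFold _ _ (((PySem.List.sorted_perm _ _ _).nodup_iff).mpr hnd)]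
      rw [pvOrder d hnd]
      simp
    rw [hord]
    have hb := pvBudget d (PySem.List.sorted d.keys pvKey) [] 0
    rw [(by ring : (48000 : Int) - 0 = 48000)] at hb
    rw [hb]
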